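-- pv_equiv track=rewrite | github.com/Shurc1val/advent-of-code-2023 | day_14.py | cycle
-- ===== SOURCE A (Python) =====
-- def cycle(grid: list[list[int]]):
--     num_tilts = 0
--     while num_tilts < 4:
--         for i in range(len(grid)):
--             for j in range(len(grid[0])):
--                 if grid[i][j] == 'O':
--                     count = 0
--                     while (i - count > 0) and grid[i - count - 1][j] not in ['O', '#']:
--                         grid[i - count - 1][j] = "O"
--                         grid[i - count][j] = "."
--                         count += 1
--
--         num_tilts += 1
--
--         # Rotate grid clockwise:
--         grid = [list(row) for row in list(zip(*grid[::-1]))]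
--
--     return grid
-- ===== SOURCE B (Python) =====
-- # Same spin cycle, but each tilt is one pass per column with a next-free-slot
-- # pointer (A bubbles each rock cell-by-cell), and the rotation indexes directly
-- # instead of zip-transposing. A mutates its argument during the first tilt; B
-- # works on a copy (return value is what is compared).
-- def cycle(grid: list[list[int]]):
--     grid = [list(row) for row in grid]
--     for _ in range(4):
--         rows = len(grid)
--         cols = len(grid[0]) if rows else 0
--         for j in range(cols):
--             free = 0
--             for r in range(rows):
--                 c = grid[r][j]
--                 if c == '#':
--                     free = r + 1
--                 elif c == 'O':
--                     if free < r:
--                         grid[free][j] = 'O'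
--                         for k in range(free + 1, r + 1):
--                             grid[k][j] = '.'
--                     free += 1
--         grid = [[grid[rows - 1 - k][j] for k in range(rows)] for j in range(cols)]
--     return grid
-- ===== Notes on version B (the rewrite author's own statement) =====
-- stated objective: alternative
-- what changed: Each tilt is a single top-to-bottom pass per column that tracks the next free slot and places each rolling rock directly (A bubbles every rock upward cell by cell, worst-case quadratic in the column height), and the clockwise rotation indexes the grid directly instead of reversing and zip-transposing.
import Mathlib
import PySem

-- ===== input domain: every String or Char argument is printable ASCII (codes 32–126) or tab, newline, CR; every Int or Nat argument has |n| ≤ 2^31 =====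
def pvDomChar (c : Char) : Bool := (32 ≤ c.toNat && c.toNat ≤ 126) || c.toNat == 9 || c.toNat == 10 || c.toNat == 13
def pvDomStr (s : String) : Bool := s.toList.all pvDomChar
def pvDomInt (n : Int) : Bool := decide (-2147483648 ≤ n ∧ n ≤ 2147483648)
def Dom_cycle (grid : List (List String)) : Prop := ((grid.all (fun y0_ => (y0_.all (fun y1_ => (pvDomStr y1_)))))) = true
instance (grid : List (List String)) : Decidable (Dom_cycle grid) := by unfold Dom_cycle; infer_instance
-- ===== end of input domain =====

-- B replaces A's per-rock cell-by-cell bubbling with one pass per column that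
-- tracks the next free slot, and rotates by direct indexing instead of
-- zip-transposition.  A mutates its argument in place during the first tilt
-- (B does not); the equivalence proved here is about the return value only.

-- ===== PORT A =====
-- grid[i][j] read; rows/indices are in range on every admitted input, getD only totalizes
def aGet (g : List (List String)) (i j : Nat) : String := (g.getD i []).getD j ""
-- grid[i][j] = v
def aSet (g : List (List String)) (i j : Nat) (v : String) : List (List String) :=
  g.set i ((g.getD i []).set j v)

-- the inner `while (i - count > 0) and grid[i-count-1][j] not in ['O','#']` loop
def bubble (g : List (List String)) (i j count : Nat) : List (List String) :=
  if h : 0 < i - count ∧ aGet g (i - count - 1) j ∉ (["O", "#"] : List String) then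
    bubble (aSet (aSet g (i - count - 1) j "O") (i - count) j ".") i j (count + 1)
  else g
termination_by i - count
decreasing_by omega

def tiltCell (g : List (List String)) (i j : Nat) : List (List String) :=
  if aGet g i j = "O" then bubble g i j 0 else g

-- one `while num_tilts < 4` body: the two tilt loops, then `zip(*grid[::-1])`
def cycle (grid : List (List String)) : List (List String) :=
  (List.range 4).foldl (fun g _ =>
    let g1 := (List.range g.length).foldl (fun ga i =>
      (List.range (ga.headD []).length).foldl (fun gb j => tiltCell gb i j) ga) g
    let rev := g1.reverse
    -- zip(*rev) truncates every row to the shortest row length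
    let n := ((rev.map (fun r => r.length)).min?).getD 0
    (List.range n).map (fun j => rev.map (fun r => r.getD j ""))) grid

-- ===== PORT B =====
-- one row step of Source B's per-column scan; state = (grid, free)
def stepB (j : Nat) (st : List (List String) × Nat) (r : Nat) : List (List String) × Nat :=
  let c := aGet st.1 r j
  if c = "#" then (st.1, r + 1)
  else if c = "O" then
    (if st.2 < r then
       (List.range' (st.2 + 1) (r - st.2)).foldl (fun g k => aSet g k j ".") (aSet st.1 st.2 j "O")
     else st.1, st.2 + 1)
  else st

def cycle_alt (grid : List (List String)) : List (List String) :=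
  (List.range 4).foldl (fun g _ =>
    let rows := g.length
    let cols := if rows = 0 then 0 else (g.headD []).length
    let g1 := (List.range cols).foldl (fun ga j =>
      ((List.range rows).foldl (stepB j) (ga, 0)).1) g
    (List.range cols).map (fun j => (List.range rows).map (fun k => aGet g1 (rows - 1 - k) j))) grid

-- ===== PRECONDITION & SPEC =====
-- Pre_cycle is exactly the domain on which the Python A returns: A indexes every row at
-- the first row's width, so it raises IndexError iff some row is shorter than the first.
def Pre_cycle (grid : List (List String)) : Prop :=
  ∀ r ∈ grid, (grid.headD []).length ≤ r.length
instance (grid : List (List String)) : Decidable (Pre_cycle grid) := by unfold Pre_cycle; infer_instance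
def pvWitness_cycle : List (List String) := [[".", "."], ["O", "#"]]

def Spec_cycle (grid : List (List String)) (out : List (List String)) : Prop := out = cycle_alt grid
instance (grid : List (List String)) (out : List (List String)) : Decidable (Spec_cycle grid out) := by unfold Spec_cycle; infer_instance

-- ===== CLAIM (what is proved, stated in full; the proofs are below) =====
def Claim_equal_cycle : Prop := ∀ (grid : List (List String)), Dom_cycle grid → Pre_cycle grid → Spec_cycle grid (cycle grid)

-- ===== LEMMAS AND PROOFS =====

theorem pv_getD_set {α : Type} (d : α) (l : List α) (a : α) (i i' : Nat) :
    (l.set i a).getD i' d = if i' = i ∧ i < l.length then a else l.getD i' d := by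
  simp only [List.getD_eq_getElem?_getD, List.getElem?_set]
  split_ifs with h1 h2 h3 <;> simp_all

-- pure-column mirror of A's bubbling
def bubbleC (c : List String) (i count : Nat) : List String :=
  if h : 0 < i - count ∧ c.getD (i - count - 1) "" ∉ (["O", "#"] : List String) then
    bubbleC ((c.set (i - count - 1) "O").set (i - count) ".") i (count + 1)
  else c
termination_by i - count
decreasing_by omega

def stepAC (c : List String) (i : Nat) : List String :=
  if c.getD i "" = "O" then bubbleC c i 0 else c

def dots (c : List String) (s n : Nat) : List String :=
  (List.range' s n).foldl (fun c' k => c'.set k ".") c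

def place (c : List String) (f m : Nat) : List String := dots (c.set f "O") (f + 1) (m - f)

-- pure-column mirror of B's row step
def stepBC (st : List String × Nat) (r : Nat) : List String × Nat :=
  let c := st.1.getD r ""
  if c = "#" then (st.1, r + 1)
  else if c = "O" then (if st.2 < r then place st.1 st.2 r else st.1, st.2 + 1)
  else st

theorem dots_length (c : List String) (s n : Nat) : (dots c s n).length = c.length := by
  induction n generalizing s c with
  | zero => simp [dots]
  | succ n ih => simp [dots, List.range'_succ, List.foldl_cons] at *; rw [ih]; simp

theorem dots_getD (c : List String) (s n p : Nat) :
    (dots c s n).getD p "" = if s ≤ p ∧ p < s + n ∧ p < c.length then "." else c.getD p "" := by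
  induction n generalizing s c with
  | zero => simp [dots]; intro h1 h2 h3; omega
  | succ n ih =>
    simp only [dots, List.range'_succ, List.foldl_cons] at *
    rw [ih]
    simp only [List.length_set]
    rw [pv_getD_set]
    split_ifs <;> simp_all <;> omega

theorem place_length (c : List String) (f m : Nat) : (place c f m).length = c.length := by
  simp [place, dots_length]

theorem place_getD (c : List String) (f m p : Nat) (hfm : f ≤ m) :
    (place c f m).getD p "" =
      if p < c.length then
        (if p = f then "O" else if f < p ∧ p ≤ m then "." else c.getD p "")
      else "" := by
  simp only [place, dots_getD, List.length_set]
  rw [pv_getD_set]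
  split_ifs <;>
    first
      | rfl
      | (exfalso; omega)
      | (exact List.getD_eq_default _ _ (by omega))


theorem pv_list_ext_getD {α : Type} (d : α) : ∀ (xs ys : List α), xs.length = ys.length →
    (∀ k, xs.getD k d = ys.getD k d) → xs = ys := by
  intro xs
  induction xs with
  | nil => intro ys h _; cases ys <;> simp_all
  | cons a t ih =>
    intro ys h hk
    cases ys with
    | nil => simp_all
    | cons b u =>
      have h0 := hk 0
      simp at h0
      have : t = u := ih u (by simpa using h) (fun k => by simpa using hk (k+1))
      simp [h0, this]

theorem pv_getD_ne_default {α : Type} (d : α) (l : List α) (n : Nat) (h : l.getD n d ≠ d) :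
    n < l.length := by
  by_contra hn
  exact h (List.getD_eq_default _ _ (by omega))

theorem place_shift (c : List String) (f k : Nat) (hk : 0 < k) (hlen : f + k + 1 < c.length) :
    place ((c.set (f + k) "O").set (f + k + 1) ".") f (f + k) = place c f (f + k + 1) := by
  apply pv_list_ext_getD ""
  · simp [place_length]
  · intro p
    rw [place_getD _ _ _ _ (by omega), place_getD _ _ _ _ (by omega)]
    simp only [List.length_set]
    rw [pv_getD_set, pv_getD_set]
    simp only [List.length_set]
    split_ifs <;> first | rfl | omega

theorem bubbleC_eq (i : Nat) : ∀ (k count : Nat) (c : List String) (f : Nat),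
    i - count = f + k → i - count < c.length →
    (∀ p, f ≤ p → p < i - count → c.getD p "" ∉ (["O", "#"] : List String)) →
    (0 < f → c.getD (f - 1) "" ∈ (["O", "#"] : List String)) →
    bubbleC c i count = if k = 0 then c else place c f (i - count) := by
  intro k
  induction k with
  | zero =>
    intro count c f heq _ _ hblock
    rw [bubbleC]
    rw [dif_neg]
    · simp
    · rcases Nat.eq_zero_or_pos f with hf | hf
      · omega
      · intro hcon
        exact hcon.2 (by have := hblock hf; simpa [show i - count - 1 = f - 1 by omega] using this)
  | succ k ih =>
    intro count c f heq hlen hpass hblock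
    rw [bubbleC]
    rw [dif_pos ⟨by omega, hpass (i - count - 1) (by omega) (by omega)⟩]
    have hset1 : i - count - 1 = f + k := by omega
    have hset2 : i - count = f + k + 1 := by omega
    set c2 := ((c.set (i - count - 1) "O").set (i - count) ".") with hc2def
    have hlen2 : c2.length = c.length := by simp [hc2def]
    have hgd : ∀ p, p < f + k → c2.getD p "" = c.getD p "" := by
      intro p hp
      simp only [hc2def]
      rw [pv_getD_set, pv_getD_set]
      simp only [List.length_set]
      split_ifs <;> first | rfl | omega
    rw [ih (count + 1) c2 f (by omega) (by omega)
      (fun p hfp hpl => by rw [hgd p (by omega)]; exact hpass p hfp (by omega))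
      (fun hf => by rw [hgd (f - 1) (by omega)]; exact hblock hf)]
    rcases Nat.eq_zero_or_pos k with hk | hk
    · subst hk
      rw [if_pos rfl, if_neg (by omega : ¬ (0 : Nat) + 1 = 0)]
      simp only [hc2def, place, dots, hset2]
      have h1 : (f + 0 + 1) - f = 1 := by omega
      rw [h1]
      simp [List.range'_one]
    · rw [if_neg (by omega), if_neg (by omega)]
      rw [hc2def, hset1, hset2, show i - (count + 1) = f + k from by omega]
      exact place_shift c f k hk (by omega)

theorem stepBC_def (b : List String) (f r : Nat) :
    stepBC (b, f) r = if b.getD r "" = "#" then (b, r + 1)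
      else if b.getD r "" = "O" then (if f < r then place b f r else b, f + 1)
      else (b, f) := rfl

theorem stepAC_def (b : List String) (r : Nat) :
    stepAC b r = if b.getD r "" = "O" then bubbleC b r 0 else b := rfl

def colInv (c : List String) (f n : Nat) : Prop :=
  f ≤ n ∧ (∀ p, f ≤ p → p < n → c.getD p "" ∉ (["O", "#"] : List String)) ∧
    (0 < f → c.getD (f - 1) "" ∈ (["O", "#"] : List String))

theorem colAB (c : List String) : ∀ n : Nat,
    (List.range n).foldl stepAC c = ((List.range n).foldl stepBC (c, 0)).1 ∧
    colInv ((List.range n).foldl stepBC (c, 0)).1 ((List.range n).foldl stepBC (c, 0)).2 n ∧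
    (((List.range n).foldl stepBC (c, 0)).1).length = c.length := by
  intro n
  induction n with
  | zero =>
    refine ⟨rfl, ⟨?_, ?_, ?_⟩, rfl⟩
    · simp
    · intro p h1 h2; simp at h2
    · intro h; simp at h
  | succ n ih =>
    rw [List.range_succ, List.foldl_append, List.foldl_append]
    simp only [List.foldl_cons, List.foldl_nil]
    rcases hst : (List.range n).foldl stepBC (c, 0) with ⟨b, f⟩
    rw [hst] at ih
    obtain ⟨hab, ⟨hfn, hpass, hblock⟩, hlen⟩ := ih
    simp only at hab hfn hpass hblock hlen
    rw [hab]
    by_cases h1 : b.getD n "" = "#"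
    · rw [stepBC_def, if_pos h1, stepAC_def, if_neg (by rw [h1]; decide)]
      refine ⟨rfl, ⟨by omega, ?_, ?_⟩, hlen⟩
      · intro p hp1 hp2; simp only at hp1 ⊢; omega
      · intro _; simpa [Nat.add_sub_cancel] using Or.inr h1
    · by_cases h2 : b.getD n "" = "O"
      · have hnlt : n < b.length := pv_getD_ne_default _ _ _ (by rw [h2]; decide)
        rw [stepBC_def, if_neg h1, if_pos h2, stepAC_def, if_pos h2]
        by_cases h3 : f < n
        · rw [if_pos h3]
          have hA : bubbleC b n 0 = place b f n := by
            rw [bubbleC_eq n (n - f) 0 b f (by omega) (by omega)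
              (fun p hp1 hp2 => hpass p hp1 (by omega)) hblock]
            rw [if_neg (by omega)]
            simp
          refine ⟨hA, ⟨by omega, ?_, ?_⟩, by simp [place_length, hlen]⟩
          · intro p hp1 hp2
            simp only at hp1 hp2 ⊢
            rw [place_getD _ _ _ _ (by omega), if_pos (show p < b.length by omega),
              if_neg (show ¬ p = f by omega), if_pos (show f < p ∧ p ≤ n by omega)]
            decide
          · intro _
            simp only [Nat.add_sub_cancel]
            rw [place_getD _ _ _ _ (by omega), if_pos (show f < b.length by omega), if_pos rfl]
            decide
        · rw [if_neg h3]
          have hfn' : f = n := by omega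
          have hA : bubbleC b n 0 = b := by
            rw [bubbleC_eq n 0 0 b f (by omega) (by omega)
              (fun p hp1 hp2 => hpass p hp1 (by omega)) hblock]
            simp
          refine ⟨hA, ⟨by omega, ?_, ?_⟩, hlen⟩
          · intro p hp1 hp2; simp only at hp1 hp2; omega
          · intro _
            simp only [Nat.add_sub_cancel, hfn']
            rw [h2]; decide
      · rw [stepBC_def, if_neg h1, if_neg h2, stepAC_def, if_neg h2]
        refine ⟨rfl, ⟨by omega, ?_, ?_⟩, hlen⟩
        · intro p hp1 hp2
          simp only at hp1 hp2 ⊢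
          rcases Nat.lt_or_ge p n with hp | hp
          · exact hpass p hp1 hp
          · have hpn : p = n := by omega
            subst hpn
            intro hmem
            rcases List.mem_cons.mp hmem with h | hmem2
            · exact h2 h
            · rcases List.mem_cons.mp hmem2 with h | h
              · exact h1 h
              · simp at h
        · intro hf; exact hblock hf

def colJ (g : List (List String)) (j : Nat) : List String := g.map (fun r => r.getD j "")

def rowLen (g : List (List String)) (i : Nat) : Nat := (g.getD i []).length

theorem colJ_length (g : List (List String)) (j : Nat) : (colJ g j).length = g.length := by
  simp [colJ]

theorem colJ_getD (g : List (List String)) (i j : Nat) :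
    (colJ g j).getD i "" = aGet g i j := by
  induction g generalizing i with
  | nil => simp [colJ, aGet]
  | cons r t ih =>
    cases i with
    | zero => simp [colJ, aGet]
    | succ m => simpa [colJ, aGet] using ih m

theorem aSet_length (g : List (List String)) (i j : Nat) (v : String) :
    (aSet g i j v).length = g.length := by simp [aSet]

theorem aSet_rowLen (g : List (List String)) (i j : Nat) (v : String) (i' : Nat) :
    rowLen (aSet g i j v) i' = rowLen g i' := by
  simp only [rowLen, aSet]
  rw [pv_getD_set]
  split_ifs with h
  · rw [h.1]; simp
  · rfl

theorem colJ_aSet (g : List (List String)) (i j j' : Nat) (v : String) :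
    colJ (aSet g i j v) j' =
      if j' = j ∧ j < rowLen g i then (colJ g j').set i v else colJ g j' := by
  apply pv_list_ext_getD ""
  · split_ifs <;> simp [colJ_length, aSet_length]
  · intro k
    rw [colJ_getD]
    simp only [aGet, aSet]
    rw [pv_getD_set]
    by_cases hk : k = i ∧ i < g.length
    · rw [if_pos hk]
      rw [pv_getD_set]
      by_cases hj : j' = j ∧ j < rowLen g i
      · rw [if_pos ⟨hj.1, hj.2⟩, if_pos hj]
        rw [pv_getD_set, colJ_length]
        rw [if_pos ⟨hk.1, hk.2⟩]
    
      · rw [if_neg (by rw [rowLen] at hj; exact hj), if_neg hj]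
        rw [colJ_getD]
        simp [aGet, hk.1]
    · rw [if_neg hk]
      split_ifs with hj
      · rw [pv_getD_set, colJ_length]
        rw [if_neg (by intro h; exact hk ⟨h.1, h.2⟩)]
        rw [colJ_getD]
        rfl
      · rw [colJ_getD]
        rfl

theorem bubble_colJ (i j : Nat) : ∀ (g : List (List String)) (count : Nat),
    i < g.length → (∀ i', i' < g.length → j < rowLen g i') →
    colJ (bubble g i j count) j = bubbleC (colJ g j) i count ∧
    (∀ j', j' ≠ j → colJ (bubble g i j count) j' = colJ g j') ∧
    (bubble g i j count).length = g.length ∧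
    (∀ i', rowLen (bubble g i j count) i' = rowLen g i') := by
  refine bubble.induct i j
    (motive := fun g count =>
      i < g.length → (∀ i', i' < g.length → j < rowLen g i') →
      colJ (bubble g i j count) j = bubbleC (colJ g j) i count ∧
      (∀ j', j' ≠ j → colJ (bubble g i j count) j' = colJ g j') ∧
      (bubble g i j count).length = g.length ∧
      (∀ i', rowLen (bubble g i j count) i' = rowLen g i')) ?_ ?_
  · intro g count h ih Hi Hc
    rw [bubble, dif_pos h]
    rw [bubbleC, dif_pos (by rw [colJ_getD]; exact h)]
    set g2 := aSet (aSet g (i - count - 1) j "O") (i - count) j "." with hg2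
    have hl1 : i - count - 1 < g.length := by omega
    have hl2 : i - count < g.length := by omega
    have hg2len : g2.length = g.length := by simp [hg2, aSet_length]
    have hg2row : ∀ i', rowLen g2 i' = rowLen g i' := by
      intro i'; simp [hg2, aSet_rowLen]
    have hcolj : colJ g2 j = ((colJ g j).set (i - count - 1) "O").set (i - count) "." := by
      rw [hg2, colJ_aSet, colJ_aSet]
      rw [if_pos ⟨rfl, by rw [aSet_rowLen]; exact Hc _ hl2⟩, if_pos ⟨rfl, Hc _ hl1⟩]
    have hcolne : ∀ j', j' ≠ j → colJ g2 j' = colJ g j' := by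
      intro j' hne
      rw [hg2, colJ_aSet, colJ_aSet, if_neg (by tauto), if_neg (by tauto)]
    obtain ⟨c1, c2, c3, c4⟩ := ih (by omega) (fun i' hi' => by rw [hg2row]; exact Hc i' (by omega))
    refine ⟨?_, ?_, by omega, fun i' => by rw [c4, hg2row]⟩
    · rw [c1, hcolj]
    · intro j' hne
      rw [c2 j' hne, hcolne j' hne]
  · intro g count h _ _
    rw [bubble, dif_neg h]
    rw [bubbleC, dif_neg (by rw [colJ_getD]; exact h)]
    exact ⟨rfl, fun _ _ => rfl, rfl, fun _ => rfl⟩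

theorem tiltCell_colJ (g : List (List String)) (i j : Nat)
    (Hi : i < g.length) (Hc : ∀ i', i' < g.length → j < rowLen g i') :
    colJ (tiltCell g i j) j = stepAC (colJ g j) i ∧
    (∀ j', j' ≠ j → colJ (tiltCell g i j) j' = colJ g j') ∧
    (tiltCell g i j).length = g.length ∧
    (∀ i', rowLen (tiltCell g i j) i' = rowLen g i') := by
  simp only [tiltCell, stepAC]
  by_cases h : aGet g i j = "O"
  · rw [if_pos h, if_pos (by rw [colJ_getD]; exact h)]
    exact bubble_colJ i j g 0 Hi Hc
  · rw [if_neg h, if_neg (by rw [colJ_getD]; exact h)]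
    exact ⟨rfl, fun _ _ => rfl, rfl, fun _ => rfl⟩

theorem tiltRow_fold (i cols : Nat) : ∀ (js : List Nat) (g : List (List String)), js.Nodup →
    i < g.length → (∀ j ∈ js, j < cols) → (∀ i', i' < g.length → cols ≤ rowLen g i') →
    (∀ j, colJ (js.foldl (fun gb j => tiltCell gb i j) g) j =
      if j ∈ js then stepAC (colJ g j) i else colJ g j) ∧
    (js.foldl (fun gb j => tiltCell gb i j) g).length = g.length ∧
    (∀ i', rowLen (js.foldl (fun gb j => tiltCell gb i j) g) i' = rowLen g i') := by
  intro js
  induction js with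
  | nil => intro g _ _ _ _; exact ⟨fun j => by simp, rfl, fun _ => rfl⟩
  | cons j0 rest ih =>
    intro g hnd Hi hjs Hc
    simp only [List.foldl_cons]
    have hj0 : j0 < cols := hjs j0 (by simp)
    have hcell := tiltCell_colJ g i j0 Hi
      (fun i' hi' => lt_of_lt_of_le hj0 (Hc i' hi'))
    obtain ⟨hc1, hc2, hc3, hc4⟩ := hcell
    obtain ⟨ih1, ih2, ih3⟩ := ih (tiltCell g i j0) (List.nodup_cons.mp hnd).2 (by omega)
      (fun j hj => hjs j (by simp [hj]))
      (fun i' hi' => by rw [hc4]; exact Hc i' (by omega))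
    refine ⟨?_, by omega, fun i' => by rw [ih3, hc4]⟩
    intro j
    by_cases hj : j = j0
    · subst hj
      rw [ih1 j, if_neg (List.nodup_cons.mp hnd).1, hc1, if_pos (by simp)]
    · rw [ih1 j, hc2 j hj]
      by_cases hmem : j ∈ rest
      · rw [if_pos hmem, if_pos (by simp [hmem])]
      · rw [if_neg hmem, if_neg (by simp [hj, hmem])]

theorem headD_rowLen (g : List (List String)) : (g.headD []).length = rowLen g 0 := by
  cases g <;> simp [rowLen]

theorem tiltA_fold (cols : Nat) : ∀ (is : List Nat) (g : List (List String)),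
    (∀ i ∈ is, i < g.length) → (∀ i', i' < g.length → cols ≤ rowLen g i') → rowLen g 0 = cols →
    (∀ j, colJ (is.foldl (fun ga i =>
        (List.range (ga.headD []).length).foldl (fun gb j => tiltCell gb i j) ga) g) j =
      if j < cols then is.foldl stepAC (colJ g j) else colJ g j) ∧
    (is.foldl (fun ga i =>
        (List.range (ga.headD []).length).foldl (fun gb j => tiltCell gb i j) ga) g).length = g.length ∧
    (∀ i', rowLen (is.foldl (fun ga i =>
        (List.range (ga.headD []).length).foldl (fun gb j => tiltCell gb i j) ga) g) i' = rowLen g i') := by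
  intro is
  induction is with
  | nil => intro g _ _ _; exact ⟨fun j => by simp, rfl, fun _ => rfl⟩
  | cons i0 rest ih =>
    intro g his Hc hhead
    simp only [List.foldl_cons]
    rw [headD_rowLen, hhead]
    have hrow := tiltRow_fold i0 cols (List.range cols) g (List.nodup_range)
      (his i0 (by simp)) (fun j hj => List.mem_range.mp hj) Hc
    obtain ⟨hr1, hr2, hr3⟩ := hrow
    set g1 := (List.range cols).foldl (fun gb j => tiltCell gb i0 j) g with hg1
    obtain ⟨ih1, ih2, ih3⟩ := ih g1 (fun i hi => by rw [hr2]; exact his i (by simp [hi]))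
      (fun i' hi' => by rw [hr3]; exact Hc i' (by omega))
      (by rw [hr3, hhead])
    refine ⟨?_, by omega, fun i' => by rw [ih3, hr3]⟩
    intro j
    rw [ih1 j, hr1 j]
    by_cases hj : j < cols
    · rw [if_pos hj, if_pos (List.mem_range.mpr hj), if_pos hj]
    · rw [if_neg hj, if_neg (fun hm => hj (List.mem_range.mp hm)), if_neg hj]

theorem aSet_fold_colJ (j : Nat) : ∀ (ks : List Nat) (g : List (List String)),
    (∀ k ∈ ks, k < g.length ∧ j < rowLen g k) →
    colJ (ks.foldl (fun g k => aSet g k j ".") g) j =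
      ks.foldl (fun c k => c.set k ".") (colJ g j) ∧
    (∀ j', j' ≠ j → colJ (ks.foldl (fun g k => aSet g k j ".") g) j' = colJ g j') ∧
    (ks.foldl (fun g k => aSet g k j ".") g).length = g.length ∧
    (∀ i', rowLen (ks.foldl (fun g k => aSet g k j ".") g) i' = rowLen g i') := by
  intro ks
  induction ks with
  | nil => intro g _; exact ⟨rfl, fun _ _ => rfl, rfl, fun _ => rfl⟩
  | cons k0 rest ih =>
    intro g hk
    simp only [List.foldl_cons]
    obtain ⟨ih1, ih2, ih3, ih4⟩ := ih (aSet g k0 j ".")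
      (fun k hkr => ⟨by rw [aSet_length]; exact (hk k (by simp [hkr])).1,
        by rw [aSet_rowLen]; exact (hk k (by simp [hkr])).2⟩)
    refine ⟨?_, ?_, by rw [ih3, aSet_length], fun i' => by rw [ih4, aSet_rowLen]⟩
    · rw [ih1, colJ_aSet, if_pos ⟨rfl, (hk k0 (by simp)).2⟩]
    · intro j' hne
      rw [ih2 j' hne, colJ_aSet, if_neg (by tauto)]

theorem stepB_colJ (g : List (List String)) (f r j cols : Nat)
    (hj : j < cols) (hr : r < g.length) (Hc : ∀ i', i' < g.length → cols ≤ rowLen g i') :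
    colJ (stepB j (g, f) r).1 j = (stepBC (colJ g j, f) r).1 ∧
    (stepB j (g, f) r).2 = (stepBC (colJ g j, f) r).2 ∧
    (∀ j', j' ≠ j → colJ (stepB j (g, f) r).1 j' = colJ g j') ∧
    (stepB j (g, f) r).1.length = g.length ∧
    (∀ i', rowLen (stepB j (g, f) r).1 i' = rowLen g i') := by
  have hget : aGet g r j = (colJ g j).getD r "" := (colJ_getD g r j).symm
  simp only [stepB, stepBC_def, hget]
  by_cases h1 : (colJ g j).getD r "" = "#"
  · rw [if_pos h1, if_pos h1]
    exact ⟨rfl, rfl, fun _ _ => rfl, rfl, fun _ => rfl⟩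
  · rw [if_neg h1, if_neg h1]
    by_cases h2 : (colJ g j).getD r "" = "O"
    · rw [if_pos h2, if_pos h2]
      by_cases h3 : f < r
      · rw [if_pos h3, if_pos h3]
        have hfold := aSet_fold_colJ j (List.range' (f + 1) (r - f)) (aSet g f j "O")
          (fun k hkm => by
            have hk := List.mem_range'_1.mp hkm
            have hkg : k < g.length := by omega
            exact ⟨by rw [aSet_length]; omega,
              by rw [aSet_rowLen]; exact lt_of_lt_of_le hj (Hc k hkg)⟩)
        obtain ⟨hf1, hf2, hf3, hf4⟩ := hfold
        have hcset : colJ (aSet g f j "O") j = (colJ g j).set f "O" := by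
          rw [colJ_aSet, if_pos ⟨rfl, lt_of_lt_of_le hj (Hc f (by omega))⟩]
        refine ⟨?_, rfl, ?_, by rw [hf3, aSet_length], fun i' => by rw [hf4, aSet_rowLen]⟩
        · rw [hf1, hcset]
          rfl
        · intro j' hne
          rw [hf2 j' hne, colJ_aSet, if_neg (by tauto)]
      · rw [if_neg h3, if_neg h3]
        exact ⟨rfl, rfl, fun _ _ => rfl, rfl, fun _ => rfl⟩
    · rw [if_neg h2, if_neg h2]
      exact ⟨rfl, rfl, fun _ _ => rfl, rfl, fun _ => rfl⟩

theorem tiltColB_fold (j cols : Nat) (hj : j < cols) : ∀ (rs : List Nat) (g : List (List String)) (f : Nat),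
    (∀ r ∈ rs, r < g.length) → (∀ i', i' < g.length → cols ≤ rowLen g i') →
    colJ (rs.foldl (stepB j) (g, f)).1 j = (rs.foldl stepBC (colJ g j, f)).1 ∧
    (rs.foldl (stepB j) (g, f)).2 = (rs.foldl stepBC (colJ g j, f)).2 ∧
    (∀ j', j' ≠ j → colJ (rs.foldl (stepB j) (g, f)).1 j' = colJ g j') ∧
    (rs.foldl (stepB j) (g, f)).1.length = g.length ∧
    (∀ i', rowLen (rs.foldl (stepB j) (g, f)).1 i' = rowLen g i') := by
  intro rs
  induction rs with
  | nil => intro g f _ _; exact ⟨rfl, rfl, fun _ _ => rfl, rfl, fun _ => rfl⟩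
  | cons r0 rest ih =>
    intro g f hrs Hc
    simp only [List.foldl_cons]
    obtain ⟨hs1, hs2, hs3, hs4, hs5⟩ := stepB_colJ g f r0 j cols hj (hrs r0 (by simp)) Hc
    rcases hsb : stepB j (g, f) r0 with ⟨g2, f2⟩
    rw [hsb] at hs1 hs2 hs3 hs4 hs5
    simp only at hs1 hs2 hs3 hs4 hs5
    obtain ⟨ih1, ih2, ih3, ih4, ih5⟩ := ih g2 f2
      (fun r hrm => by rw [hs4]; exact hrs r (by simp [hrm]))
      (fun i' hi' => by rw [hs5]; exact Hc i' (by rw [← hs4]; exact hi'))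
    have hstate : (stepBC (colJ g j, f) r0) = (colJ g2 j, f2) := by
      rw [Prod.ext_iff]
      exact ⟨hs1.symm, hs2.symm⟩
    rw [hstate]
    refine ⟨ih1, ih2, ?_, by rw [ih4, hs4], fun i' => by rw [ih5, hs5]⟩
    intro j' hne
    rw [ih3 j' hne, hs3 j' hne]

theorem tiltB_fold (cols rows : Nat) : ∀ (js : List Nat) (g : List (List String)), js.Nodup →
    (∀ j ∈ js, j < cols) → (∀ i', i' < g.length → cols ≤ rowLen g i') → g.length = rows →
    (∀ j, colJ (js.foldl (fun ga j => ((List.range rows).foldl (stepB j) (ga, 0)).1) g) j =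
      if j ∈ js then ((List.range rows).foldl stepBC (colJ g j, 0)).1 else colJ g j) ∧
    (js.foldl (fun ga j => ((List.range rows).foldl (stepB j) (ga, 0)).1) g).length = g.length ∧
    (∀ i', rowLen (js.foldl (fun ga j => ((List.range rows).foldl (stepB j) (ga, 0)).1) g) i' = rowLen g i') := by
  intro js
  induction js with
  | nil => intro g _ _ _ _; exact ⟨fun j => by simp, rfl, fun _ => rfl⟩
  | cons j0 rest ih =>
    intro g hnd hjs Hc hrows
    simp only [List.foldl_cons]
    have hj0 : j0 < cols := hjs j0 (by simp)
    obtain ⟨hc1, hc2, hc3, hc4, hc5⟩ := tiltColB_fold j0 cols hj0 (List.range rows) g 0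
      (fun r hr => by rw [hrows]; exact List.mem_range.mp hr) Hc
    set g1 := ((List.range rows).foldl (stepB j0) (g, 0)).1 with hg1
    obtain ⟨ih1, ih2, ih3⟩ := ih g1 (List.nodup_cons.mp hnd).2
      (fun j hjm => hjs j (by simp [hjm]))
      (fun i' hi' => by rw [hc5]; exact Hc i' (by rw [← hc4]; exact hi'))
      (by rw [hc4, hrows])
    refine ⟨?_, by rw [ih2, hc4], fun i' => by rw [ih3, hc5]⟩
    intro j
    by_cases hj : j = j0
    · subst hj
      rw [ih1 j, if_neg (List.nodup_cons.mp hnd).1, hc1, if_pos (by simp)]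
    · rw [ih1 j, hc3 j hj]
      by_cases hmem : j ∈ rest
      · rw [if_pos hmem, if_pos (by simp [hmem])]
      · rw [if_neg hmem, if_neg (by simp [hj, hmem])]

def tiltA (g : List (List String)) : List (List String) :=
  (List.range g.length).foldl (fun ga i =>
    (List.range (ga.headD []).length).foldl (fun gb j => tiltCell gb i j) ga) g

def rotA (t : List (List String)) : List (List String) :=
  (List.range ((t.reverse.map (fun r => r.length)).min?.getD 0)).map
    (fun j => t.reverse.map (fun r => r.getD j ""))

def onceA (g : List (List String)) : List (List String) := rotA (tiltA g)

def tiltB (g : List (List String)) : List (List String) :=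
  (List.range (if g.length = 0 then 0 else (g.headD []).length)).foldl
    (fun ga j => ((List.range g.length).foldl (stepB j) (ga, 0)).1) g

def onceB (g : List (List String)) : List (List String) :=
  (List.range (if g.length = 0 then 0 else (g.headD []).length)).map
    (fun j => (List.range g.length).map (fun k => aGet (tiltB g) (g.length - 1 - k) j))

theorem cycle_once (g : List (List String)) : cycle g = onceA (onceA (onceA (onceA g))) := by
  show (List.range 4).foldl _ g = _
  rw [show (List.range 4) = [0, 1, 2, 3] by rfl]
  simp only [List.foldl_cons, List.foldl_nil, onceA, tiltA, rotA]

theorem cycle_alt_once (g : List (List String)) :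
    cycle_alt g = onceB (onceB (onceB (onceB g))) := by
  show (List.range 4).foldl _ g = _
  rw [show (List.range 4) = [0, 1, 2, 3] by rfl]
  simp only [List.foldl_cons, List.foldl_nil, onceB, tiltB]

theorem grid_ext (g h : List (List String)) (hlen : g.length = h.length)
    (hrow : ∀ i, rowLen g i = rowLen h i) (hcol : ∀ j, colJ g j = colJ h j) : g = h := by
  apply pv_list_ext_getD ([] : List String) g h hlen
  intro k
  apply pv_list_ext_getD ""
  · exact hrow k
  · intro j
    have hc : (colJ g j).getD k "" = (colJ h j).getD k "" := by rw [hcol j]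
    rw [colJ_getD, colJ_getD] at hc
    exact hc

theorem pre_to_rows (g : List (List String)) (hpre : Pre_cycle g) :
    ∀ i, i < g.length → rowLen g 0 ≤ rowLen g i := by
  intro i hi
  have hmem : g.getD i [] ∈ g := by
    rw [List.getD_eq_getElem?_getD, List.getElem?_eq_getElem hi]
    exact List.getElem_mem hi
  have := hpre _ hmem
  rwa [headD_rowLen] at this

theorem mem_rowLen (t : List (List String)) (r : List String) (h : r ∈ t) :
    ∃ i, i < t.length ∧ rowLen t i = r.length := by
  obtain ⟨i, hi, hr⟩ := List.mem_iff_getElem.mp h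
  refine ⟨i, hi, ?_⟩
  rw [rowLen, List.getD_eq_getElem?_getD, List.getElem?_eq_getElem hi, hr]
  rfl

theorem min_rot (t : List (List String)) (cols : Nat)
    (hhead : rowLen t 0 = cols) (hall : ∀ i, i < t.length → cols ≤ rowLen t i)
    (hz : t.length = 0 → cols = 0) :
    ((t.reverse.map (fun r => r.length)).min?).getD 0 = cols := by
  cases t with
  | nil => simp [hz rfl]
  | cons a s =>
    have hmin : (((a :: s).reverse.map (fun r => r.length)).min?) = some cols := by
      rw [List.min?_eq_some_iff]
      refine ⟨?_, ?_⟩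
      · have hmem : a ∈ (a :: s).reverse := by simp
        have ha : a.length = cols := by simpa [rowLen] using hhead
        exact ha ▸ List.mem_map_of_mem hmem
      · intro b hb
        obtain ⟨r, hr, hrb⟩ := List.mem_map.mp hb
        obtain ⟨i, hi, hrl⟩ := mem_rowLen (a :: s) r (List.mem_reverse.mp hr)
        rw [← hrb, ← hrl]
        exact hall i hi
    rw [hmin]
    rfl

theorem cols_rowLen (g : List (List String)) :
    rowLen g 0 = (if g.length = 0 then 0 else (g.headD []).length) := by
  cases g <;> simp [rowLen]

theorem tilt_eq (g : List (List String)) (hpre : Pre_cycle g) :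
    tiltA g = tiltB g ∧ (tiltA g).length = g.length ∧ (∀ i, rowLen (tiltA g) i = rowLen g i) := by
  have hcols : rowLen g 0 = (if g.length = 0 then 0 else (g.headD []).length) := cols_rowLen g
  set cols := if g.length = 0 then 0 else (g.headD []).length with hcolsdef
  have Hc : ∀ i', i' < g.length → cols ≤ rowLen g i' :=
    fun i' h => hcols ▸ pre_to_rows g hpre i' h
  obtain ⟨a1, a2, a3⟩ := tiltA_fold cols (List.range g.length) g
    (fun i h => List.mem_range.mp h) Hc hcols
  obtain ⟨b1, b2, b3⟩ := tiltB_fold cols g.length (List.range cols) g List.nodup_range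
    (fun j h => List.mem_range.mp h) Hc rfl
  have hA : tiltA g = (List.range g.length).foldl (fun ga i =>
      (List.range (ga.headD []).length).foldl (fun gb j => tiltCell gb i j) ga) g := rfl
  have hB : tiltB g = (List.range cols).foldl
      (fun ga j => ((List.range g.length).foldl (stepB j) (ga, 0)).1) g := rfl
  refine ⟨?_, by rw [hA, a2], fun i => by rw [hA, a3]⟩
  rw [hA, hB]
  apply grid_ext
  · rw [a2, b2]
  · intro i; rw [a3, b3]
  · intro j
    rw [a1 j, b1 j]
    by_cases hj : j < cols
    · rw [if_pos hj, if_pos (List.mem_range.mpr hj)]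
      exact (colAB (colJ g j) g.length).1
    · rw [if_neg hj, if_neg (fun hm => hj (List.mem_range.mp hm))]

theorem getD_map_range (f : Nat → String) (n k : Nat) :
    ((List.range n).map f).getD k "" = if k < n then f k else "" := by
  rw [List.getD_eq_getElem?_getD, List.getElem?_map]
  by_cases h : k < n
  · rw [List.getElem?_range h, if_pos h]
    rfl
  · rw [List.getElem?_eq_none (by simpa using h), if_neg h]
    rfl

theorem aGet_reverse (t : List (List String)) (k j : Nat) (hk : k < t.length) :
    aGet t.reverse k j = aGet t (t.length - 1 - k) j := by
  simp only [aGet]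
  have h1 : t.reverse.getD k [] = t.reverse[k]'(by simpa using hk) := by
    rw [List.getD_eq_getElem?_getD, List.getElem?_eq_getElem (by simpa using hk)]
    rfl
  have h2 : t.getD (t.length - 1 - k) [] = t[t.length - 1 - k]'(by omega) := by
    rw [List.getD_eq_getElem?_getD, List.getElem?_eq_getElem (by omega)]
    rfl
  rw [h1, h2, List.getElem_reverse]

theorem once_eq (g : List (List String)) (hpre : Pre_cycle g) : onceA g = onceB g := by
  have hcols : rowLen g 0 = (if g.length = 0 then 0 else (g.headD []).length) := cols_rowLen g
  set cols := if g.length = 0 then 0 else (g.headD []).length with hcolsdef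
  have Hc : ∀ i', i' < g.length → cols ≤ rowLen g i' :=
    fun i' h => hcols ▸ pre_to_rows g hpre i' h
  obtain ⟨hAB, hlen, hrow⟩ := tilt_eq g hpre
  have hmin : (((tiltA g).reverse.map (fun r => r.length)).min?).getD 0 = cols := by
    apply min_rot
    · rw [hrow 0, hcols]
    · intro i hi
      rw [hrow i]
      exact Hc i (by rw [← hlen]; exact hi)
    · intro h0
      rw [hlen] at h0
      rw [hcolsdef, if_pos h0]
  rw [onceA, onceB, ← hcolsdef, ← hAB, rotA, hmin]
  apply List.map_congr_left
  intro j hj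
  apply pv_list_ext_getD ""
  · simp [hlen]
  · intro k
    have hL : ((tiltA g).reverse.map (fun r => r.getD j "")).getD k "" = aGet (tiltA g).reverse k j := by
      have : (tiltA g).reverse.map (fun r => r.getD j "") = colJ (tiltA g).reverse j := rfl
      rw [this, colJ_getD]
    rw [hL, getD_map_range]
    by_cases hk : k < g.length
    · rw [if_pos hk, aGet_reverse _ _ _ (by rw [hlen]; exact hk), hlen]
    · rw [if_neg hk]
      simp only [aGet]
      have hnil : (tiltA g).reverse.getD k [] = [] :=
        List.getD_eq_default _ _ (by rw [List.length_reverse, hlen]; omega)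
      rw [hnil]
      rfl

theorem pre_of_const_rows (out : List (List String)) (L : Nat)
    (h : ∀ r ∈ out, r.length = L) : Pre_cycle out := by
  intro r hr
  rw [h r hr]
  cases out with
  | nil => simp at hr
  | cons a s =>
    simp only [List.headD_cons]
    rw [h a (by simp)]

theorem pre_onceA (g : List (List String)) : Pre_cycle (onceA g) := by
  rw [onceA, rotA]
  apply pre_of_const_rows _ (tiltA g).reverse.length
  intro r hr
  obtain ⟨j, _, hrr⟩ := List.mem_map.mp hr
  rw [← hrr]
  simp

-- ===== VERDICT (by name: the statement is the Claim_ definition above) =====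
theorem cycle_spec : Claim_equal_cycle := by
  intro g _ hpre
  unfold Spec_cycle
  have e1 := once_eq g hpre
  have p1 : Pre_cycle (onceB g) := by rw [← e1]; exact pre_onceA g
  have e2 := once_eq (onceB g) p1
  have p2 : Pre_cycle (onceB (onceB g)) := by rw [← e2]; exact pre_onceA (onceB g)
  have e3 := once_eq (onceB (onceB g)) p2
  have p3 : Pre_cycle (onceB (onceB (onceB g))) := by rw [← e3]; exact pre_onceA (onceB (onceB g))
  have e4 := once_eq (onceB (onceB (onceB g))) p3
  rw [cycle_once, cycle_alt_once, e1, e2, e3, e4]
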